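-- pv_equiv track=rewrite | github.com/hannesmitterer/euystacio-ai | build_static.py | convert_flask_to_static
-- ===== SOURCE A (Python) =====
-- def convert_flask_to_static(template_content):
--     """
--     Convert Flask template syntax to static paths
--     """
--     # Replace Flask url_for with static paths
--     replacements = [
--         ("{{ url_for('static', filename='css/style.css') }}", "static/css/style.css"),
--         ("{{ url_for('static', filename='js/app.js') }}", "static/js/app.js"),
--         ("{{ url_for('static', filename='css/pulse.css') }}", "static/css/pulse.css"),
--         ("{{ url_for('static', filename='js/pulse.js') }}", "static/js/pulse.js"),
--     ]
--
--     for old, new in replacements: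
--         template_content = template_content.replace(old, new)
--
--     return template_content
-- ===== SOURCE B (Python) =====
-- def convert_flask_to_static(template_content):
--     """
--     Convert Flask template syntax to static paths
--     """
--     replacements = [
--         ("{{ url_for('static', filename='css/style.css') }}", "static/css/style.css"),
--         ("{{ url_for('static', filename='js/app.js') }}", "static/js/app.js"),
--         ("{{ url_for('static', filename='css/pulse.css') }}", "static/css/pulse.css"),
--         ("{{ url_for('static', filename='js/pulse.js') }}", "static/js/pulse.js"),
--     ]
--     out = []
--     i = 0
--     n = len(template_content)
--     while i < n:
--         for old, new in replacements:
--             if template_content.startswith(old, i):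
--                 out.append(new)
--                 i += len(old)
--                 break
--         else:
--             out.append(template_content[i])
--             i += 1
--     return "".join(out)
-- ===== Notes on version B (the rewrite author's own statement) =====
-- stated objective: alternative
-- what changed: B makes a single left-to-right scan over the content, matching the four Flask literals at each position and emitting the static path or the current character, instead of A's four sequential full-string .replace passes.
import Mathlib
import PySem

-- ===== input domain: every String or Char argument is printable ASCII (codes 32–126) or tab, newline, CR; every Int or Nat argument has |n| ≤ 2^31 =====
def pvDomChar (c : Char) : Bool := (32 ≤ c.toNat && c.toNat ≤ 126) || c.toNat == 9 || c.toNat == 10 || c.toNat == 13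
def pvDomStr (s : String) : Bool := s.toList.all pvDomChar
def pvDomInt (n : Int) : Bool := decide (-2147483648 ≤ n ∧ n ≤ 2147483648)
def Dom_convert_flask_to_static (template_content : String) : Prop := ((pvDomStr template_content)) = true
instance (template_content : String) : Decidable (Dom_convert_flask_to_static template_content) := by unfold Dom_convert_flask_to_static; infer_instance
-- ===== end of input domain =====

-- B replaces A's four sequential full-string .replace passes by a single left-to-right scan
-- that matches the four Flask literals at each position (objective: alternative single-pass algorithm).

-- ===== PORT A =====
def convert_flask_to_static (template_content : String) : String :=
  let replacements : List (String × String) :=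
    [("{{ url_for('static', filename='css/style.css') }}", "static/css/style.css"),
     ("{{ url_for('static', filename='js/app.js') }}", "static/js/app.js"),
     ("{{ url_for('static', filename='css/pulse.css') }}", "static/css/pulse.css"),
     ("{{ url_for('static', filename='js/pulse.js') }}", "static/js/pulse.js")]
  replacements.foldl (fun acc pr => PySem.Str.replace acc pr.1 pr.2) template_content

-- ===== PORT B =====
-- the four (old, new) pairs of Source B, as character lists
def pvK1 : List Char := "{{ url_for('static', filename='css/style.css') }}".toList
def pvV1 : List Char := "static/css/style.css".toList
def pvK2 : List Char := "{{ url_for('static', filename='js/app.js') }}".toList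
def pvV2 : List Char := "static/js/app.js".toList
def pvK3 : List Char := "{{ url_for('static', filename='css/pulse.css') }}".toList
def pvV3 : List Char := "static/css/pulse.css".toList
def pvK4 : List Char := "{{ url_for('static', filename='js/pulse.js') }}".toList
def pvV4 : List Char := "static/js/pulse.js".toList

-- Source B's while-loop: at each position try the four keys in order (startswith), emit the
-- replacement and skip the key, else emit the current character and advance by one.
def multiGo : List Char → List Char
  | [] => []
  | c :: t =>
    if pvK1.isPrefixOf (c :: t) then pvV1 ++ multiGo ((c :: t).drop pvK1.length)
    else if pvK2.isPrefixOf (c :: t) then pvV2 ++ multiGo ((c :: t).drop pvK2.length)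
    else if pvK3.isPrefixOf (c :: t) then pvV3 ++ multiGo ((c :: t).drop pvK3.length)
    else if pvK4.isPrefixOf (c :: t) then pvV4 ++ multiGo ((c :: t).drop pvK4.length)
    else c :: multiGo t
termination_by l => l.length
decreasing_by
  all_goals simp [List.length_drop, pvK1, pvK2, pvK3, pvK4]

def convert_flask_to_static_alt (template_content : String) : String :=
  String.ofList (multiGo template_content.toList)

-- ===== PRECONDITION & SPEC =====
def Spec_convert_flask_to_static (template_content : String) (out : String) : Prop := out = convert_flask_to_static_alt template_content
instance (template_content : String) (out : String) : Decidable (Spec_convert_flask_to_static template_content out) := by unfold Spec_convert_flask_to_static; infer_instance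

-- ===== CLAIM (what is proved, stated in full; the proofs are below) =====
def Claim_equal_convert_flask_to_static : Prop := ∀ (template_content : String), Dom_convert_flask_to_static template_content → Spec_convert_flask_to_static template_content (convert_flask_to_static template_content)

-- ===== LEMMAS AND PROOFS =====

-- Clean form of Python's str.replace on character lists (old nonempty): leftmost,
-- non-overlapping, left-to-right.
def rep (o n : List Char) : List Char → List Char
  | [] => []
  | c :: t =>
    if h : o ≠ [] ∧ o.isPrefixOf (c :: t) = true then n ++ rep o n ((c :: t).drop o.length)
    else c :: rep o n t  -- h also justifies termination below
termination_by l => l.length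
decreasing_by
  · have h1 : 0 < o.length := List.length_pos_iff.mpr h.1
    simp [List.length_drop]; omega
  · simp

theorem rep_nil (o n : List Char) : rep o n [] = [] := by simp [rep]

theorem rep_cons_pos (o n t : List Char) (c : Char) (ho : o ≠ []) (hp : o <+: (c :: t)) :
    rep o n (c :: t) = n ++ rep o n ((c :: t).drop o.length) := by
  rw [rep]; simp [ho, List.isPrefixOf_iff_prefix.mpr hp]

theorem rep_cons_neg (o n t : List Char) (c : Char) (hp : ¬ o <+: (c :: t)) :
    rep o n (c :: t) = c :: rep o n t := by
  rw [rep]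
  simp only [dite_eq_ite, ite_eq_right_iff]
  intro h
  exact absurd (List.isPrefixOf_iff_prefix.mp h.2) hp

theorem go_eq_rep (o n : List Char) (ho : o ≠ []) :
    ∀ (fuel : Nat) (l acc : List Char), l.length ≤ fuel →
      PySem.Chars.replace.go o n fuel l acc = acc.reverse ++ rep o n l := by
  intro fuel
  induction fuel with
  | zero =>
    intro l acc h
    have hl : l = [] := by cases l <;> simp_all
    subst hl
    simp [PySem.Chars.replace.go, rep_nil]
  | succ f ih =>
    intro l acc h
    cases l with
    | nil => simp [PySem.Chars.replace.go, rep_nil]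
    | cons c t =>
      by_cases hp : o.isPrefixOf (c :: t) = true
      · rw [PySem.Chars.replace.go]
        simp only [hp, if_pos]
        have ho1 : 0 < o.length := List.length_pos_iff.mpr ho
        have hlen : ((c :: t).drop o.length).length ≤ f := by
          simp only [List.length_drop] at *
          simp at h ⊢; omega
        rw [ih _ _ hlen, rep_cons_pos o n t c ho (List.isPrefixOf_iff_prefix.mp hp)]
        simp
      · rw [PySem.Chars.replace.go]
        simp only [hp, if_neg, Bool.false_eq_true, not_false_eq_true]
        have hlen : t.length ≤ f := by simp at h; omega
        rw [ih _ _ hlen, rep_cons_neg o n t c (fun hc => hp (List.isPrefixOf_iff_prefix.mpr hc))]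
        simp

theorem replace_eq_rep (s o n : List Char) (ho : o ≠ []) :
    PySem.Chars.replace s o n = rep o n s := by
  unfold PySem.Chars.replace
  rw [if_neg (by simp [List.isEmpty_iff, ho])]
  rw [go_eq_rep o n ho s.length s [] le_rfl]
  simp

-- suffix-compatibility check used by the skip/no-new-occurrence lemmas
def sfxFree (u p : List Char) : Bool :=
  u.tails.all (fun v => v.isEmpty || (!(p.isPrefixOf v) && !(v.isPrefixOf p)))

theorem sfxFree_spec {u p v : List Char} (h : sfxFree u p = true) (hv : v <:+ u) (hvne : v ≠ []) :
    ¬ p <+: v ∧ ¬ v <+: p := by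
  have hm := List.all_eq_true.mp h v ((List.mem_tails v u).mpr hv)
  simp [List.isEmpty_iff, hvne] at hm
  exact ⟨fun hc => by simp [List.isPrefixOf_iff_prefix.mpr hc] at hm,
         fun hc => by simp [List.isPrefixOf_iff_prefix.mpr hc] at hm⟩

-- rep passes unchanged over a block u none of whose suffixes is prefix-comparable with o
theorem rep_skip (o n : List Char) (_ho : o ≠ []) :
    ∀ (u s : List Char), sfxFree u o = true → rep o n (u ++ s) = u ++ rep o n s := by
  intro u
  induction u with
  | nil => simp
  | cons c u' ih =>
    intro s hu
    have hfull : ¬ o <+: (c :: u') ∧ ¬ (c :: u') <+: o :=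
      sfxFree_spec hu (List.suffix_refl _) (by simp)
    have hnp : ¬ o <+: (c :: (u' ++ s)) := by
      intro hp
      rcases List.prefix_or_prefix_of_prefix hp
        (show (c :: u') <+: (c :: (u' ++ s)) by simp [List.cons_prefix_cons]) with h1 | h1
      · exact hfull.1 h1
      · exact hfull.2 h1
    have hu' : sfxFree u' o = true := by
      simp only [sfxFree, List.tails, List.all_cons, Bool.and_eq_true] at hu
      exact hu.2
    calc rep o n ((c :: u') ++ s) = rep o n (c :: (u' ++ s)) := by simp
      _ = c :: rep o n (u' ++ s) := rep_cons_neg _ _ _ _ hnp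
      _ = c :: (u' ++ rep o n s) := by rw [ih s hu']
      _ = (c :: u') ++ rep o n s := by simp

-- rep o n cannot create a new occurrence of a suffix q of Q at the front
-- when no nonempty suffix of Q is prefix-comparable with the replacement n
theorem rep_nopre (o n Q : List Char) (ho : o ≠ []) (hQ : sfxFree Q n = true) :
    ∀ (m : Nat) (x q : List Char), x.length ≤ m → q <:+ Q → q ≠ [] →
      ¬ q <+: x → ¬ q <+: rep o n x := by
  intro m
  induction m with
  | zero =>
    intro x q hm hq hqne hx
    have : x = [] := by cases x <;> simp_all
    subst this
    simpa [rep_nil] using hx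
  | succ f ih =>
    intro x q hm hq hqne hx
    cases x with
    | nil => simpa [rep_nil] using hx
    | cons c t =>
      by_cases hp : o <+: (c :: t)
      · rw [rep_cons_pos o n t c ho hp]
        intro hc
        rcases List.prefix_or_prefix_of_prefix hc (List.prefix_append n _) with h1 | h1
        · exact (sfxFree_spec hQ hq hqne).2 h1
        · exact (sfxFree_spec hQ hq hqne).1 h1
      · rw [rep_cons_neg o n t c hp]
        cases q with
        | nil => exact absurd rfl hqne
        | cons e q' =>
          intro hc
          rw [List.cons_prefix_cons] at hc
          obtain ⟨rfl, hq'⟩ := hc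
          by_cases hq'e : q' = []
          · subst hq'e
            exact hx (by simp [List.cons_prefix_cons])
          · have hq'Q : q' <:+ Q := (List.suffix_cons _ _).trans hq
            have hx' : ¬ q' <+: t := by
              intro hcc
              exact hx (by simp [List.cons_prefix_cons, hcc])
            have hlen : t.length ≤ f := by simp at hm; omega
            exact ih t q' hlen hq'Q hq'e hx' hq'

-- abbreviations for the four passes
def rep1 (l : List Char) : List Char := rep pvK1 pvV1 l
def rep2 (l : List Char) : List Char := rep pvK2 pvV2 l
def rep3 (l : List Char) : List Char := rep pvK3 pvV3 l
def rep4 (l : List Char) : List Char := rep pvK4 pvV4 l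

-- literal-string side conditions, all checked by the kernel
theorem pvK1_ne : pvK1 ≠ [] := by decide
theorem pvK2_ne : pvK2 ≠ [] := by decide
theorem pvK3_ne : pvK3 ≠ [] := by decide
theorem pvK4_ne : pvK4 ≠ [] := by decide

theorem multiGo_nil : multiGo [] = [] := by simp [multiGo]

theorem multiGo_cons (c : Char) (t : List Char) :
    multiGo (c :: t) =
      if pvK1.isPrefixOf (c :: t) then pvV1 ++ multiGo ((c :: t).drop pvK1.length)
      else if pvK2.isPrefixOf (c :: t) then pvV2 ++ multiGo ((c :: t).drop pvK2.length)
      else if pvK3.isPrefixOf (c :: t) then pvV3 ++ multiGo ((c :: t).drop pvK3.length)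
      else if pvK4.isPrefixOf (c :: t) then pvV4 ++ multiGo ((c :: t).drop pvK4.length)
      else c :: multiGo t := by
  rw [multiGo]

-- firing case of rep: the pattern sits at the front
theorem rep_fire (o n s : List Char) (ho : o ≠ []) :
    rep o n (o ++ s) = n ++ rep o n s := by
  cases o with
  | nil => exact absurd rfl ho
  | cons d o' =>
    rw [List.cons_append, rep_cons_pos (d :: o') n (o' ++ s) d ho ⟨s, rfl⟩]
    have hd : List.drop (d :: o').length (d :: (o' ++ s)) = s := by
      show List.drop o'.length (o' ++ s) = s
      exact List.drop_left
    rw [hd]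

-- four sequential passes equal the single scan
theorem chain_eq_multi : ∀ (m : Nat) (l : List Char), l.length ≤ m →
    rep4 (rep3 (rep2 (rep1 l))) = multiGo l := by
  intro m
  induction m with
  | zero =>
    intro l hm
    have : l = [] := by cases l <;> simp_all
    subst this
    simp [rep1, rep2, rep3, rep4, rep_nil, multiGo_nil]
  | succ f ih =>
    intro l hm
    cases l with
    | nil => simp [rep1, rep2, rep3, rep4, rep_nil, multiGo_nil]
    | cons c t =>
      simp only [rep1, rep2, rep3, rep4] at ih ⊢
      simp only [List.length_cons] at hm
      by_cases h1 : pvK1 <+: (c :: t)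
      · -- pass 1 fires; passes 2-4 pass over pvV1 (it shares no prefix with the keys)
        obtain ⟨rest, hrest⟩ := h1
        have hdrop : (c :: t).drop pvK1.length = rest := by
          rw [← hrest, List.drop_left]
        have hlen : rest.length ≤ f := by
          have h' := congrArg List.length hrest
          rw [List.length_append] at h'
          have hK : 0 < pvK1.length := List.length_pos_iff.mpr pvK1_ne
          simp only [List.length_cons] at h'
          omega
        have e1 : rep pvK1 pvV1 (c :: t) = pvV1 ++ rep pvK1 pvV1 rest := by
          rw [← hrest]; exact rep_fire _ _ _ pvK1_ne
        rw [multiGo_cons, if_pos (List.isPrefixOf_iff_prefix.mpr ⟨rest, hrest⟩), hdrop,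
            e1, rep_skip pvK2 pvV2 pvK2_ne pvV1 _ (by decide),
            rep_skip pvK3 pvV3 pvK3_ne pvV1 _ (by decide),
            rep_skip pvK4 pvV4 pvK4_ne pvV1 _ (by decide)]
        exact congrArg (pvV1 ++ ·) (ih rest hlen)
      by_cases h2 : pvK2 <+: (c :: t)
      · -- pass 1 passes over pvK2, pass 2 fires, passes 3-4 pass over pvV2
        obtain ⟨rest, hrest⟩ := h2
        have hdrop : (c :: t).drop pvK2.length = rest := by
          rw [← hrest, List.drop_left]
        have hlen : rest.length ≤ f := by
          have h' := congrArg List.length hrest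
          rw [List.length_append] at h'
          have hK : 0 < pvK2.length := List.length_pos_iff.mpr pvK2_ne
          simp only [List.length_cons] at h'
          omega
        have h1f : pvK1.isPrefixOf (c :: t) = false :=
          Bool.eq_false_iff.mpr (fun hb => h1 (List.isPrefixOf_iff_prefix.mp hb))
        have e1 : rep pvK1 pvV1 (c :: t) = pvK2 ++ rep pvK1 pvV1 rest := by
          rw [← hrest]; exact rep_skip pvK1 pvV1 pvK1_ne pvK2 rest (by decide)
        rw [multiGo_cons, h1f]
        simp only [Bool.false_eq_true, if_false]
        rw [if_pos (List.isPrefixOf_iff_prefix.mpr ⟨rest, hrest⟩), hdrop,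
            e1, rep_fire pvK2 pvV2 _ pvK2_ne,
            rep_skip pvK3 pvV3 pvK3_ne pvV2 _ (by decide),
            rep_skip pvK4 pvV4 pvK4_ne pvV2 _ (by decide)]
        exact congrArg (pvV2 ++ ·) (ih rest hlen)
      by_cases h3 : pvK3 <+: (c :: t)
      · -- passes 1-2 pass over pvK3, pass 3 fires, pass 4 passes over pvV3
        obtain ⟨rest, hrest⟩ := h3
        have hdrop : (c :: t).drop pvK3.length = rest := by
          rw [← hrest, List.drop_left]
        have hlen : rest.length ≤ f := by
          have h' := congrArg List.length hrest
          rw [List.length_append] at h'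
          have hK : 0 < pvK3.length := List.length_pos_iff.mpr pvK3_ne
          simp only [List.length_cons] at h'
          omega
        have h1f : pvK1.isPrefixOf (c :: t) = false :=
          Bool.eq_false_iff.mpr (fun hb => h1 (List.isPrefixOf_iff_prefix.mp hb))
        have h2f : pvK2.isPrefixOf (c :: t) = false :=
          Bool.eq_false_iff.mpr (fun hb => h2 (List.isPrefixOf_iff_prefix.mp hb))
        have e1 : rep pvK1 pvV1 (c :: t) = pvK3 ++ rep pvK1 pvV1 rest := by
          rw [← hrest]; exact rep_skip pvK1 pvV1 pvK1_ne pvK3 rest (by decide)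
        rw [multiGo_cons, h1f, h2f]
        simp only [Bool.false_eq_true, if_false]
        rw [if_pos (List.isPrefixOf_iff_prefix.mpr ⟨rest, hrest⟩), hdrop,
            e1, rep_skip pvK2 pvV2 pvK2_ne pvK3 _ (by decide),
            rep_fire pvK3 pvV3 _ pvK3_ne,
            rep_skip pvK4 pvV4 pvK4_ne pvV3 _ (by decide)]
        exact congrArg (pvV3 ++ ·) (ih rest hlen)
      by_cases h4 : pvK4 <+: (c :: t)
      · -- passes 1-3 pass over pvK4, pass 4 fires
        obtain ⟨rest, hrest⟩ := h4
        have hdrop : (c :: t).drop pvK4.length = rest := by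
          rw [← hrest, List.drop_left]
        have hlen : rest.length ≤ f := by
          have h' := congrArg List.length hrest
          rw [List.length_append] at h'
          have hK : 0 < pvK4.length := List.length_pos_iff.mpr pvK4_ne
          simp only [List.length_cons] at h'
          omega
        have h1f : pvK1.isPrefixOf (c :: t) = false :=
          Bool.eq_false_iff.mpr (fun hb => h1 (List.isPrefixOf_iff_prefix.mp hb))
        have h2f : pvK2.isPrefixOf (c :: t) = false :=
          Bool.eq_false_iff.mpr (fun hb => h2 (List.isPrefixOf_iff_prefix.mp hb))
        have h3f : pvK3.isPrefixOf (c :: t) = false :=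
          Bool.eq_false_iff.mpr (fun hb => h3 (List.isPrefixOf_iff_prefix.mp hb))
        have e1 : rep pvK1 pvV1 (c :: t) = pvK4 ++ rep pvK1 pvV1 rest := by
          rw [← hrest]; exact rep_skip pvK1 pvV1 pvK1_ne pvK4 rest (by decide)
        rw [multiGo_cons, h1f, h2f, h3f]
        simp only [Bool.false_eq_true, if_false]
        rw [if_pos (List.isPrefixOf_iff_prefix.mpr ⟨rest, hrest⟩), hdrop,
            e1, rep_skip pvK2 pvV2 pvK2_ne pvK4 _ (by decide),
            rep_skip pvK3 pvV3 pvK3_ne pvK4 _ (by decide),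
            rep_fire pvK4 pvV4 _ pvK4_ne]
        exact congrArg (pvV4 ++ ·) (ih rest hlen)
      · -- no key matches at this position: every pass copies c
        have hlen : t.length ≤ f := by omega
        have en1 : rep pvK1 pvV1 (c :: t) = c :: rep pvK1 pvV1 t := rep_cons_neg _ _ _ _ h1
        have np2 : ¬ pvK2 <+: rep pvK1 pvV1 (c :: t) :=
          rep_nopre pvK1 pvV1 pvK2 pvK1_ne (by decide) (c :: t).length (c :: t) pvK2
            le_rfl (List.suffix_refl _) (by decide) h2
        have en2 : rep pvK2 pvV2 (rep pvK1 pvV1 (c :: t))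
            = c :: rep pvK2 pvV2 (rep pvK1 pvV1 t) := by
          rw [en1] at np2 ⊢
          exact rep_cons_neg _ _ _ _ np2
        have np3 : ¬ pvK3 <+: rep pvK2 pvV2 (rep pvK1 pvV1 (c :: t)) :=
          rep_nopre pvK2 pvV2 pvK3 pvK2_ne (by decide) (rep pvK1 pvV1 (c :: t)).length _ pvK3
            le_rfl (List.suffix_refl _) (by decide)
            (rep_nopre pvK1 pvV1 pvK3 pvK1_ne (by decide) (c :: t).length (c :: t) pvK3
              le_rfl (List.suffix_refl _) (by decide) h3)
        have en3 : rep pvK3 pvV3 (rep pvK2 pvV2 (rep pvK1 pvV1 (c :: t)))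
            = c :: rep pvK3 pvV3 (rep pvK2 pvV2 (rep pvK1 pvV1 t)) := by
          rw [en2] at np3 ⊢
          exact rep_cons_neg _ _ _ _ np3
        have np4 : ¬ pvK4 <+: rep pvK3 pvV3 (rep pvK2 pvV2 (rep pvK1 pvV1 (c :: t))) :=
          rep_nopre pvK3 pvV3 pvK4 pvK3_ne (by decide)
            (rep pvK2 pvV2 (rep pvK1 pvV1 (c :: t))).length _ pvK4
            le_rfl (List.suffix_refl _) (by decide)
            (rep_nopre pvK2 pvV2 pvK4 pvK2_ne (by decide) (rep pvK1 pvV1 (c :: t)).length _ pvK4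
              le_rfl (List.suffix_refl _) (by decide)
              (rep_nopre pvK1 pvV1 pvK4 pvK1_ne (by decide) (c :: t).length (c :: t) pvK4
                le_rfl (List.suffix_refl _) (by decide) h4))
        have en4 : rep pvK4 pvV4 (rep pvK3 pvV3 (rep pvK2 pvV2 (rep pvK1 pvV1 (c :: t))))
            = c :: rep pvK4 pvV4 (rep pvK3 pvV3 (rep pvK2 pvV2 (rep pvK1 pvV1 t))) := by
          rw [en3] at np4 ⊢
          exact rep_cons_neg _ _ _ _ np4
        have h1f : pvK1.isPrefixOf (c :: t) = false :=
          Bool.eq_false_iff.mpr (fun hb => h1 (List.isPrefixOf_iff_prefix.mp hb))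
        have h2f : pvK2.isPrefixOf (c :: t) = false :=
          Bool.eq_false_iff.mpr (fun hb => h2 (List.isPrefixOf_iff_prefix.mp hb))
        have h3f : pvK3.isPrefixOf (c :: t) = false :=
          Bool.eq_false_iff.mpr (fun hb => h3 (List.isPrefixOf_iff_prefix.mp hb))
        have h4f : pvK4.isPrefixOf (c :: t) = false :=
          Bool.eq_false_iff.mpr (fun hb => h4 (List.isPrefixOf_iff_prefix.mp hb))
        rw [en4, multiGo_cons, h1f, h2f, h3f, h4f]
        simp only [Bool.false_eq_true, if_false]
        exact congrArg (c :: ·) (ih t hlen)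

theorem str_replace_eq (a o n : String) (ho : o.toList ≠ []) :
    PySem.Str.replace a o n = String.ofList (rep o.toList n.toList a.toList) := by
  unfold PySem.Str.replace
  rw [replace_eq_rep _ _ _ ho]

theorem convert_eq_chain (s : String) :
    convert_flask_to_static s = String.ofList (rep4 (rep3 (rep2 (rep1 s.toList)))) := by
  show PySem.Str.replace (PySem.Str.replace (PySem.Str.replace (PySem.Str.replace s
      "{{ url_for('static', filename='css/style.css') }}" "static/css/style.css")
      "{{ url_for('static', filename='js/app.js') }}" "static/js/app.js")
      "{{ url_for('static', filename='css/pulse.css') }}" "static/css/pulse.css")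
      "{{ url_for('static', filename='js/pulse.js') }}" "static/js/pulse.js" = _
  rw [str_replace_eq _ _ _ (by decide), String.toList_ofList]
  rw [str_replace_eq _ _ _ (by decide), String.toList_ofList]
  rw [str_replace_eq _ _ _ (by decide), String.toList_ofList]
  rw [str_replace_eq _ _ _ (by decide)]
  simp only [String.toList_ofList]
  simp only [rep1, rep2, rep3, rep4, pvK1, pvV1, pvK2, pvV2, pvK3, pvV3, pvK4, pvV4]
  rfl

-- ===== VERDICT (by name: the statement is the Claim_ definition above) =====
theorem convert_flask_to_static_spec : Claim_equal_convert_flask_to_static := by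
  intro s _
  unfold Spec_convert_flask_to_static convert_flask_to_static_alt
  rw [convert_eq_chain s, chain_eq_multi s.toList.length s.toList le_rfl]
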